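-- pv_equiv track=rewrite | github.com/codenogo/innercircle-sacco | scripts/workflow_checks.py | summarize_checksets
-- ===== SOURCE A (Python) =====
-- from typing import Any
--
-- def summarize_checksets(per_pkg: list[dict[str, Any]]) -> dict[str, str]:
--     """
--     Aggregate overall lint/tests/types results.
--     """
--     summary = {"lint": "skipped", "typecheck": "skipped", "tests": "skipped"}
--     mapping = {"lint": "lint", "typecheck": "typecheck", "test": "tests"}
--
--     for pkg in per_pkg:
--         for c in pkg.get("checks", []):
--             nm = c.get("name")
--             res = c.get("result")
--             if nm not in mapping:
--                 continue
--             key = mapping[nm]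
--             if res == "fail":
--                 summary[key] = "fail"
--             elif res == "pass" and summary[key] != "fail":
--                 summary[key] = "pass"
--             elif summary[key] == "skipped" and res == "skipped":
--                 summary[key] = "skipped"
--     return summary
-- ===== SOURCE B (Python) =====
-- from typing import Any
--
-- def summarize_checksets(per_pkg: list[dict[str, Any]]) -> dict[str, str]:
--     """
--     Aggregate overall lint/tests/types results (gather results per key, then reduce).
--     """
--     mapping = {"lint": "lint", "typecheck": "typecheck", "test": "tests"}
--     seen = {"lint": set(), "typecheck": set(), "tests": set()}
--     for pkg in per_pkg:
--         for c in pkg.get("checks", []):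
--             key = mapping.get(c.get("name"))
--             if key is not None:
--                 seen[key].add(c.get("result"))
--     return {
--         k: ("fail" if "fail" in rs else "pass" if "pass" in rs else "skipped")
--         for k, rs in seen.items()
--     }
-- ===== Notes on version B (the rewrite author's own statement) =====
-- stated objective: simpler
-- what changed: Replaces A's precedence-ordered stateful in-place updates of the summary dict with a gather-then-reduce structure: one pass collecting the set of result strings per category, then a separate reduction ('fail' if any fail, else 'pass' if any pass, else 'skipped') per key.
import Mathlib
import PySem

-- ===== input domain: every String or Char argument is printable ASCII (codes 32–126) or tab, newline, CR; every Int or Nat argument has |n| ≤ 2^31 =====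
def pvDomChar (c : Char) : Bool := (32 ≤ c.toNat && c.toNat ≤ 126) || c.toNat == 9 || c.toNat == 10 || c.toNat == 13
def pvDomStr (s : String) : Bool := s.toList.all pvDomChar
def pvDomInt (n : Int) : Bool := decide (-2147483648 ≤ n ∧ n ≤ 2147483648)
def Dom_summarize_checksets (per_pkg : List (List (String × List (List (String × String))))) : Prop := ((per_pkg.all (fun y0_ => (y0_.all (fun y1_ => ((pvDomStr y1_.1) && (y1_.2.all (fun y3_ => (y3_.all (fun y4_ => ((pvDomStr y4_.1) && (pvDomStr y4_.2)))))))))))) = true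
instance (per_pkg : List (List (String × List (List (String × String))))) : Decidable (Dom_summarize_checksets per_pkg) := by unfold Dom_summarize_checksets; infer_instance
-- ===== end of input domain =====

-- B replaces A's precedence-ordered in-place updates of the summary dict by a gather-then-reduce
-- decomposition (collect the set of results per category, then reduce each set to a label); same
-- return value, objective: simpler.

-- ===== PORT A =====
def pvMappingA : PySem.Dict String String :=
  PySem.Dict.ofList [("lint", "lint"), ("typecheck", "typecheck"), ("test", "tests")]

def pvSummary0 : PySem.Dict String String :=
  PySem.Dict.ofList [("lint", "skipped"), ("typecheck", "skipped"), ("tests", "skipped")]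

-- body of A's inner loop, step for step (key = mapping[nm] is written out at each use)
def pvCheckStepA (summary : PySem.Dict String String) (c : List (String × String)) :
    PySem.Dict String String :=
  match (PySem.Dict.mk c).get? "name" with
  | none => summary            -- None is never a key of mapping: continue
  | some n =>
    if pvMappingA.contains n = false then summary   -- if nm not in mapping: continue
    else
      if (PySem.Dict.mk c).get? "result" = some "fail" then
        summary.insert (pvMappingA.getD n "") "fail"
      else if (PySem.Dict.mk c).get? "result" = some "pass" ∧
          summary.getD (pvMappingA.getD n "") "" ≠ "fail" then
        summary.insert (pvMappingA.getD n "") "pass"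
      else if summary.getD (pvMappingA.getD n "") "" = "skipped" ∧
          (PySem.Dict.mk c).get? "result" = some "skipped" then
        summary.insert (pvMappingA.getD n "") "skipped"
      else summary

def pvPkgStepA (summary : PySem.Dict String String)
    (pkg : List (String × List (List (String × String)))) : PySem.Dict String String :=
  ((PySem.Dict.mk pkg).getD "checks" []).foldl pvCheckStepA summary

def summarize_checksets (per_pkg : List (List (String × List (List (String × String))))) :
    List (String × String) :=
  (per_pkg.foldl pvPkgStepA pvSummary0).items

-- ===== PORT B =====
def pvMappingB : PySem.Dict String String :=
  PySem.Dict.ofList [("lint", "lint"), ("typecheck", "typecheck"), ("test", "tests")]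

def pvSeen0 : PySem.Dict String (List (Option String)) :=
  PySem.Dict.ofList
    [("lint", PySem.Set.empty), ("typecheck", PySem.Set.empty), ("tests", PySem.Set.empty)]

-- body of B's gathering loop: translate the check's name and record its result in that set
def pvGatherStep (seen : PySem.Dict String (List (Option String))) (c : List (String × String)) :
    PySem.Dict String (List (Option String)) :=
  match (match (PySem.Dict.mk c).get? "name" with
         | none => none
         | some n => pvMappingB.get? n) with
  | none => seen
  | some k => seen.modify k [] (fun rs => PySem.Set.add rs ((PySem.Dict.mk c).get? "result"))

def pvGatherPkg (seen : PySem.Dict String (List (Option String)))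
    (pkg : List (String × List (List (String × String)))) :
    PySem.Dict String (List (Option String)) :=
  ((PySem.Dict.mk pkg).getD "checks" []).foldl pvGatherStep seen

-- reduction of one gathered result-set to its label
def pvLabel (rs : List (Option String)) : String :=
  if PySem.Set.contains rs (some "fail") then "fail"
  else if PySem.Set.contains rs (some "pass") then "pass"
  else "skipped"

def summarize_checksets_alt (per_pkg : List (List (String × List (List (String × String))))) :
    List (String × String) :=
  (per_pkg.foldl pvGatherPkg pvSeen0).items.map (fun p => (p.1, pvLabel p.2))

-- ===== PRECONDITION & SPEC =====
def Spec_summarize_checksets (per_pkg : List (List (String × List (List (String × String))))) (out : List (String × String)) : Prop := out = summarize_checksets_alt per_pkg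
instance (per_pkg : List (List (String × List (List (String × String))))) (out : List (String × String)) : Decidable (Spec_summarize_checksets per_pkg out) := by unfold Spec_summarize_checksets; infer_instance

-- ===== CLAIM (what is proved, stated in full; the proofs are below) =====
def Claim_equal_summarize_checksets : Prop := ∀ (per_pkg : List (List (String × List (List (String × String))))), Dom_summarize_checksets per_pkg → Spec_summarize_checksets per_pkg (summarize_checksets per_pkg)

-- ===== LEMMAS AND PROOFS =====

-- model state: the three gathered result-sets (lint, typecheck, tests)
def pvTstep (t : List (Option String) × List (Option String) × List (Option String))
    (c : List (String × String)) :
    List (Option String) × List (Option String) × List (Option String) :=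
  match (match (PySem.Dict.mk c).get? "name" with
         | none => none
         | some n => pvMappingB.get? n) with
  | none => t
  | some k =>
    if k = "lint" then (PySem.Set.add t.1 ((PySem.Dict.mk c).get? "result"), t.2.1, t.2.2)
    else if k = "typecheck" then (t.1, PySem.Set.add t.2.1 ((PySem.Dict.mk c).get? "result"), t.2.2)
    else (t.1, t.2.1, PySem.Set.add t.2.2 ((PySem.Dict.mk c).get? "result"))

def pvDD (t : List (Option String) × List (Option String) × List (Option String)) :
    PySem.Dict String String :=
  PySem.Dict.mk [("lint", pvLabel t.1), ("typecheck", pvLabel t.2.1), ("tests", pvLabel t.2.2)]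

def pvSS (t : List (Option String) × List (Option String) × List (Option String)) :
    PySem.Dict String (List (Option String)) :=
  PySem.Dict.mk [("lint", t.1), ("typecheck", t.2.1), ("tests", t.2.2)]

theorem pvMemAdd (s : List (Option String)) (r x : Option String) :
    x ∈ PySem.Set.add s r ↔ x ∈ s ∨ x = r := by
  unfold PySem.Set.add
  split_ifs with h
  · simp only [PySem.Set.contains_eq_listContains, List.contains_iff_mem] at h
    constructor
    · exact Or.inl
    · rintro (h' | rfl)
      · exact h'
      · exact h
  · simp

theorem pvLabel_add (s : List (Option String)) (r : Option String) :
    pvLabel (PySem.Set.add s r) =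
      if r = some "fail" then "fail"
      else if r = some "pass" ∧ pvLabel s ≠ "fail" then "pass"
      else pvLabel s := by
  unfold pvLabel
  by_cases hr : r = some "fail"
  · subst hr
    simp [pvMemAdd]
  · have hr' : ¬ ((some "fail" : Option String) = r) := fun h => hr h.symm
    by_cases hq : r = some "pass"
    · subst hq
      by_cases hf : (some "fail" : Option String) ∈ s
      · simp [pvMemAdd, hf]
      · simp [pvMemAdd, hf, hr']
        split_ifs <;> simp_all
    · have hq' : ¬ ((some "pass" : Option String) = r) := fun h => hq h.symm
      simp [pvMemAdd, hr', hq', hr, hq]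

theorem pvInsA_lint (s1 s2 s3 : List (Option String)) (r : Option String) :
    (if r = some "fail" then (pvDD (s1, s2, s3)).insert "lint" "fail"
     else if r = some "pass" ∧ (pvDD (s1, s2, s3)).getD "lint" "" ≠ "fail" then
       (pvDD (s1, s2, s3)).insert "lint" "pass"
     else if (pvDD (s1, s2, s3)).getD "lint" "" = "skipped" ∧ r = some "skipped" then
       (pvDD (s1, s2, s3)).insert "lint" "skipped"
     else pvDD (s1, s2, s3)) = pvDD (PySem.Set.add s1 r, s2, s3) := by
  have hg : (pvDD (s1, s2, s3)).getD "lint" "" = pvLabel s1 := by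
    simp [pvDD, PySem.Dict.getD, PySem.Dict.get?]
  have hi : ∀ v, (pvDD (s1, s2, s3)).insert "lint" v =
      PySem.Dict.mk [("lint", v), ("typecheck", pvLabel s2), ("tests", pvLabel s3)] := by
    intro v
    simp [pvDD, PySem.Dict.insert, PySem.Dict.contains, PySem.Dict.get?]
  rw [hg, hi, hi, hi,
    show pvDD (PySem.Set.add s1 r, s2, s3) =
      PySem.Dict.mk [("lint", pvLabel (PySem.Set.add s1 r)), ("typecheck", pvLabel s2),
        ("tests", pvLabel s3)] from rfl,
    pvLabel_add]
  split_ifs <;> simp_all [pvDD]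

theorem pvInsA_typecheck (s1 s2 s3 : List (Option String)) (r : Option String) :
    (if r = some "fail" then (pvDD (s1, s2, s3)).insert "typecheck" "fail"
     else if r = some "pass" ∧ (pvDD (s1, s2, s3)).getD "typecheck" "" ≠ "fail" then
       (pvDD (s1, s2, s3)).insert "typecheck" "pass"
     else if (pvDD (s1, s2, s3)).getD "typecheck" "" = "skipped" ∧ r = some "skipped" then
       (pvDD (s1, s2, s3)).insert "typecheck" "skipped"
     else pvDD (s1, s2, s3)) = pvDD (s1, PySem.Set.add s2 r, s3) := by
  have hg : (pvDD (s1, s2, s3)).getD "typecheck" "" = pvLabel s2 := by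
    simp [pvDD, PySem.Dict.getD, PySem.Dict.get?]
  have hi : ∀ v, (pvDD (s1, s2, s3)).insert "typecheck" v =
      PySem.Dict.mk [("lint", pvLabel s1), ("typecheck", v), ("tests", pvLabel s3)] := by
    intro v
    simp [pvDD, PySem.Dict.insert, PySem.Dict.contains, PySem.Dict.get?]
  rw [hg, hi, hi, hi,
    show pvDD (s1, PySem.Set.add s2 r, s3) =
      PySem.Dict.mk [("lint", pvLabel s1), ("typecheck", pvLabel (PySem.Set.add s2 r)),
        ("tests", pvLabel s3)] from rfl,
    pvLabel_add]
  split_ifs <;> simp_all [pvDD]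

theorem pvInsA_tests (s1 s2 s3 : List (Option String)) (r : Option String) :
    (if r = some "fail" then (pvDD (s1, s2, s3)).insert "tests" "fail"
     else if r = some "pass" ∧ (pvDD (s1, s2, s3)).getD "tests" "" ≠ "fail" then
       (pvDD (s1, s2, s3)).insert "tests" "pass"
     else if (pvDD (s1, s2, s3)).getD "tests" "" = "skipped" ∧ r = some "skipped" then
       (pvDD (s1, s2, s3)).insert "tests" "skipped"
     else pvDD (s1, s2, s3)) = pvDD (s1, s2, PySem.Set.add s3 r) := by
  have hg : (pvDD (s1, s2, s3)).getD "tests" "" = pvLabel s3 := by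
    simp [pvDD, PySem.Dict.getD, PySem.Dict.get?]
  have hi : ∀ v, (pvDD (s1, s2, s3)).insert "tests" v =
      PySem.Dict.mk [("lint", pvLabel s1), ("typecheck", pvLabel s2), ("tests", v)] := by
    intro v
    simp [pvDD, PySem.Dict.insert, PySem.Dict.contains, PySem.Dict.get?]
  rw [hg, hi, hi, hi,
    show pvDD (s1, s2, PySem.Set.add s3 r) =
      PySem.Dict.mk [("lint", pvLabel s1), ("typecheck", pvLabel s2),
        ("tests", pvLabel (PySem.Set.add s3 r))] from rfl,
    pvLabel_add]
  split_ifs <;> simp_all [pvDD]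

theorem pvInsB_lint (s1 s2 s3 : List (Option String)) (r : Option String) :
    (pvSS (s1, s2, s3)).modify "lint" [] (fun rs => PySem.Set.add rs r) =
      pvSS (PySem.Set.add s1 r, s2, s3) := by
  simp [pvSS, PySem.Dict.modify, PySem.Dict.getD, PySem.Dict.get?, PySem.Dict.insert,
    PySem.Dict.contains]

theorem pvInsB_typecheck (s1 s2 s3 : List (Option String)) (r : Option String) :
    (pvSS (s1, s2, s3)).modify "typecheck" [] (fun rs => PySem.Set.add rs r) =
      pvSS (s1, PySem.Set.add s2 r, s3) := by
  simp [pvSS, PySem.Dict.modify, PySem.Dict.getD, PySem.Dict.get?, PySem.Dict.insert,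
    PySem.Dict.contains]

theorem pvInsB_tests (s1 s2 s3 : List (Option String)) (r : Option String) :
    (pvSS (s1, s2, s3)).modify "tests" [] (fun rs => PySem.Set.add rs r) =
      pvSS (s1, s2, PySem.Set.add s3 r) := by
  simp [pvSS, PySem.Dict.modify, PySem.Dict.getD, PySem.Dict.get?, PySem.Dict.insert,
    PySem.Dict.contains]

theorem pvMapB_none (n : String) (h1 : ¬ n = "lint") (h2 : ¬ n = "typecheck")
    (h3 : ¬ n = "test") : pvMappingB.get? n = none := by
  have e : pvMappingB =
      PySem.Dict.mk [("lint", "lint"), ("typecheck", "typecheck"), ("test", "tests")] := by decide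
  have b1 : (("lint" : String) == n) = false := beq_eq_false_iff_ne.mpr (Ne.symm h1)
  have b2 : (("typecheck" : String) == n) = false := beq_eq_false_iff_ne.mpr (Ne.symm h2)
  have b3 : (("test" : String) == n) = false := beq_eq_false_iff_ne.mpr (Ne.symm h3)
  rw [e]
  simp [PySem.Dict.get?, List.find?, b1, b2, b3]

theorem pvMapA_none (n : String) (h1 : ¬ n = "lint") (h2 : ¬ n = "typecheck")
    (h3 : ¬ n = "test") : pvMappingA.contains n = false := by
  rw [PySem.Dict.contains_eq_isSome_get?,
    show pvMappingA.get? n = pvMappingB.get? n from rfl, pvMapB_none n h1 h2 h3]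
  rfl

theorem pvCheckStepA_DD (t : List (Option String) × List (Option String) × List (Option String))
    (c : List (String × String)) : pvCheckStepA (pvDD t) c = pvDD (pvTstep t c) := by
  obtain ⟨s1, s2, s3⟩ := t
  unfold pvCheckStepA pvTstep
  rcases hnm : (PySem.Dict.mk c).get? "name" with _ | n
  · simp only [hnm]
  · simp only [hnm]
    generalize (PySem.Dict.mk c).get? "result" = r
    by_cases h1 : n = "lint"
    · subst h1
      simpa [show pvMappingA.contains "lint" = true from by decide,
        show pvMappingA.getD "lint" "" = "lint" from by decide,
        show pvMappingB.get? "lint" = some "lint" from by decide]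
        using pvInsA_lint s1 s2 s3 r
    · by_cases h2 : n = "typecheck"
      · subst h2
        simpa [show pvMappingA.contains "typecheck" = true from by decide,
          show pvMappingA.getD "typecheck" "" = "typecheck" from by decide,
          show pvMappingB.get? "typecheck" = some "typecheck" from by decide]
          using pvInsA_typecheck s1 s2 s3 r
      · by_cases h3 : n = "test"
        · subst h3
          simpa [show pvMappingA.contains "test" = true from by decide,
            show pvMappingA.getD "test" "" = "tests" from by decide,
            show pvMappingB.get? "test" = some "tests" from by decide]
            using pvInsA_tests s1 s2 s3 r
        · simp [pvMapA_none n h1 h2 h3, pvMapB_none n h1 h2 h3]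

theorem pvGatherStep_SS (t : List (Option String) × List (Option String) × List (Option String))
    (c : List (String × String)) : pvGatherStep (pvSS t) c = pvSS (pvTstep t c) := by
  obtain ⟨s1, s2, s3⟩ := t
  unfold pvGatherStep pvTstep
  rcases hnm : (PySem.Dict.mk c).get? "name" with _ | n
  · simp only [hnm]
  · simp only [hnm]
    generalize (PySem.Dict.mk c).get? "result" = r
    by_cases h1 : n = "lint"
    · subst h1
      simpa [show pvMappingB.get? "lint" = some "lint" from by decide]
        using pvInsB_lint s1 s2 s3 r
    · by_cases h2 : n = "typecheck"
      · subst h2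
        simpa [show pvMappingB.get? "typecheck" = some "typecheck" from by decide]
          using pvInsB_typecheck s1 s2 s3 r
      · by_cases h3 : n = "test"
        · subst h3
          simpa [show pvMappingB.get? "test" = some "tests" from by decide]
            using pvInsB_tests s1 s2 s3 r
        · simp [pvMapB_none n h1 h2 h3]

theorem pvFoldA (cs : List (List (String × String)))
    (t : List (Option String) × List (Option String) × List (Option String)) :
    cs.foldl pvCheckStepA (pvDD t) = pvDD (cs.foldl pvTstep t) := by
  induction cs generalizing t with
  | nil => rfl
  | cons c cs ih => simp [List.foldl, pvCheckStepA_DD, ih]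

theorem pvFoldB (cs : List (List (String × String)))
    (t : List (Option String) × List (Option String) × List (Option String)) :
    cs.foldl pvGatherStep (pvSS t) = pvSS (cs.foldl pvTstep t) := by
  induction cs generalizing t with
  | nil => rfl
  | cons c cs ih => simp [List.foldl, pvGatherStep_SS, ih]

def pvPkgT (t : List (Option String) × List (Option String) × List (Option String))
    (pkg : List (String × List (List (String × String)))) :
    List (Option String) × List (Option String) × List (Option String) :=
  ((PySem.Dict.mk pkg).getD "checks" []).foldl pvTstep t

theorem pvOuterA (pp : List (List (String × List (List (String × String)))))
    (t : List (Option String) × List (Option String) × List (Option String)) :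
    pp.foldl pvPkgStepA (pvDD t) = pvDD (pp.foldl pvPkgT t) := by
  induction pp generalizing t with
  | nil => rfl
  | cons p pp ih => simp [List.foldl, pvPkgStepA, pvPkgT, pvFoldA, ih]

theorem pvOuterB (pp : List (List (String × List (List (String × String)))))
    (t : List (Option String) × List (Option String) × List (Option String)) :
    pp.foldl pvGatherPkg (pvSS t) = pvSS (pp.foldl pvPkgT t) := by
  induction pp generalizing t with
  | nil => rfl
  | cons p pp ih => simp [List.foldl, pvGatherPkg, pvPkgT, pvFoldB, ih]

-- ===== VERDICT (by name: the statement is the Claim_ definition above) =====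
theorem summarize_checksets_spec : Claim_equal_summarize_checksets := by
  intro pp _
  unfold Spec_summarize_checksets summarize_checksets summarize_checksets_alt
  have h0 : pvSummary0 = pvDD ([], [], []) := by decide
  have h1 : pvSeen0 = pvSS ([], [], []) := by decide
  rw [h0, h1, pvOuterA, pvOuterB]
  rfl
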